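-- pv_equiv track=rewrite | github.com/nttkor/programmers | pccp_ex/programdelay_heapq.py | solution
-- ===== SOURCE A (Python) =====
-- import heapq
--
-- def solution(program):
--     answer = [0 for _ in range(11)]
--
--     # 시작 시간, 레벨 기준 정렬 (우선 시작 시간, 그 다음 레벨 우선)
--     program.sort(key=lambda x: (x[1], x[0]))
--
--     wait_heap = []  # 실행 대기 큐 (레벨 기준 min-heap)
--     time = 0        # 현재 시간
--     i = 0           # program 리스트 인덱스
--
--     while i < len(program) or wait_heap:
--         # 현재 시간에 시작 가능한 프로그램을 모두 대기 큐에 삽입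
--         while i < len(program) and program[i][1] <= time:
--             level, start, duration = program[i]
--             heapq.heappush(wait_heap, (level, start, duration))
--             i += 1
--
--         if wait_heap:
--             level, start, duration = heapq.heappop(wait_heap)
--             # 대기 시간은 현재 시간 - 시작 시간
--             answer[level] += time - start
--             time += duration  # 현재 시간 갱신
--             answer[0] = time  # 마지막 실행 완료 시간 갱신
--         else:
--             # 실행할 수 있는 프로그램이 없으면 다음 프로그램까지 시간 점프
--             if i < len(program):
--                 time = program[i][1]
--
--     return answer
-- ===== SOURCE B (Python) =====
-- def solution(program):
--     # Different decomposition: no sort and no index into a sorted list.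
--     # Programs are kept as a `pending` multiset; ready ones are moved to
--     # `ready` by filtering, and the next program is the tuple-minimum of
--     # `ready`.  Unlike A, this does not sort `program` in place (the
--     # equivalence is about the return value).
--     answer = [0] * 11
--     pending = [(p[0], p[1], p[2]) for p in program]
--     ready = []
--     time = 0
--     while pending or ready:
--         ready += [t for t in pending if t[1] <= time]
--         pending = [t for t in pending if t[1] > time]
--         if ready:
--             level, start, duration = min(ready)
--             ready.remove((level, start, duration))
--             answer[level] += time - start
--             time += duration
--             answer[0] = time
--         else:
--             time = min(t[1] for t in pending)
--     return answer
-- ===== Notes on version B (the rewrite author's own statement) =====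
-- stated objective: alternative
-- what changed: The sort of program plus index-and-heap machinery is replaced by multiset filtering: a pending list is split each round by start<=time into ready/pending, the next program is picked as min(ready) by a linear scan, and idle jumps go to the minimum pending start time, so there is no sort, no running index and no heap.
import Mathlib
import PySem

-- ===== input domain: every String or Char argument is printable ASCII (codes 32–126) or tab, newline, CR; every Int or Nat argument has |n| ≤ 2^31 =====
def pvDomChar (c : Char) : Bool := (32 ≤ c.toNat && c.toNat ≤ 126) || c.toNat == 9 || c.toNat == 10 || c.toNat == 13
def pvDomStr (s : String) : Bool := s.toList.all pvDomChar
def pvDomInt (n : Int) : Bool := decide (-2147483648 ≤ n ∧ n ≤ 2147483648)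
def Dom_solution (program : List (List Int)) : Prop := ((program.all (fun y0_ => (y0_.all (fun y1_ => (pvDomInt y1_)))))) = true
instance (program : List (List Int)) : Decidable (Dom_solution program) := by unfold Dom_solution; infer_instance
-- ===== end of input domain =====

-- B replaces A's sort + running index + heapq min-heap by multiset filtering: each round the
-- pending list is split by start <= time into ready/pending, the next program is min(ready)
-- by a linear scan, and idle jumps go to the minimum pending start (objective: alternative).
-- A sorts `program` in place, B does not mutate it; the equivalence proved is about the
-- return value. Both outer while-loops are ported on a fuel of 2*len+1, which dominates the
-- iteration count (every iteration pops one of the ≤ len programs or is followed by a pop),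
-- so the fuel-out branch is never taken.

-- Python's `<` on int triples (lexicographic), used by heapq's ordering and by B's min scan.
def lexLt (a b : Int × Int × Int) : Bool :=
  decide (a.1 < b.1) ||
    (decide (a.1 = b.1) && (decide (a.2.1 < b.2.1) ||
      (decide (a.2.1 = b.2.1) && decide (a.2.2 < b.2.2))))

-- program[j][1] (start time), total form used at in-range indices only
def startOf (p : List (List Int)) (j : Nat) : Int :=
  PySem.List.pyGetD (p.getD j []) 1 0

-- ===== PORT A =====
-- heapq ported as an ordered priority queue: heappush = ordered insert, heappop = head.
-- Exact for this program: heappop returns the heap minimum, and equal triples are identical,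
-- so the sequence of popped values is exactly heapq's.
def heapPush : List (Int × Int × Int) → (Int × Int × Int) → List (Int × Int × Int)
  | [], x => [x]
  | y :: t, x => if lexLt x y then x :: y :: t else y :: heapPush t x

-- inner while: push every program whose start ≤ time (k = p.length - i, a structural bound)
def pushAllA (p : List (List Int)) (time : Int) :
    Nat → Nat → List (Int × Int × Int) → List (Int × Int × Int) × Nat
  | 0, i, h => (h, i)
  | k + 1, i, h =>
    if hi : i < p.length then
      if PySem.List.pyGetD p[i] 1 0 ≤ time then
        pushAllA p time k (i + 1)
          (heapPush h (PySem.List.pyGetD p[i] 0 0, PySem.List.pyGetD p[i] 1 0,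
            PySem.List.pyGetD p[i] 2 0))
      else (h, i)
    else (h, i)

-- outer while of A
def loopA (p : List (List Int)) :
    Nat → List Int → Int → Nat → List (Int × Int × Int) → List Int
  | 0, answer, _, _, _ => answer
  | fuel + 1, answer, time, i, heap =>
    if i < p.length ∨ heap ≠ [] then
      match pushAllA p time (p.length - i) i heap with
      | (x :: rest, i') =>
        let a1 := PySem.List.pySetD answer x.1
          (PySem.List.pyGetD answer x.1 0 + (time - x.2.1))
        let t' := time + x.2.2
        loopA p fuel (PySem.List.pySetD a1 0 t') t' i' rest
      | ([], i') =>
        if i' < p.length then loopA p fuel answer (startOf p i') i' [] else answer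
    else answer

def solution (program : List (List Int)) : List Int :=
  let p := PySem.List.sorted2 program
    (fun x => PySem.List.pyGetD x 1 0) (fun x => PySem.List.pyGetD x 0 0)
  loopA p (2 * p.length + 1) (List.replicate 11 0) 0 0 []

-- ===== PORT B =====
-- the tuple (p[0], p[1], p[2]) built in B's comprehension
def toTrip (r : List Int) : Int × Int × Int :=
  (PySem.List.pyGetD r 0 0, PySem.List.pyGetD r 1 0, PySem.List.pyGetD r 2 0)

-- min(ready): Python's builtin min keeps the first element no later one is `<` than;
-- exact here because the elements are int triples compared by lexicographic `<` = lexLt.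
def minScan (x : Int × Int × Int) (rest : List (Int × Int × Int)) : Int × Int × Int :=
  rest.foldl (fun b t => if lexLt t b then t else b) x

-- outer while of B: state is (pending, ready); each round splits pending by start ≤ time.
-- min(t[1] for t in pending) is the running binary min over the starts (exact: ints).
def loopB : Nat → List Int → Int → List (Int × Int × Int) → List (Int × Int × Int) → List Int
  | 0, answer, _, _, _ => answer
  | fuel + 1, answer, time, pending, ready =>
    if pending ≠ [] ∨ ready ≠ [] then
      let ready' := ready ++ pending.filter (fun t => decide (t.2.1 ≤ time))
      let pending' := pending.filter (fun t => decide (time < t.2.1))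
      match ready' with
      | x :: rest =>
        let best := minScan x rest
        let ready'' := (PySem.List.remove? (x :: rest) best).getD (x :: rest)
        let a1 := PySem.List.pySetD answer best.1
          (PySem.List.pyGetD answer best.1 0 + (time - best.2.1))
        let t' := time + best.2.2
        loopB fuel (PySem.List.pySetD a1 0 t') t' pending' ready''
      | [] =>
        match pending' with
        | q :: qs => loopB fuel answer (qs.foldl (fun m t => min m t.2.1) q.2.1) pending' []
        | [] => answer   -- unreachable: the guard gives pending ≠ [] and none was ready
    else answer

def solution_alt (program : List (List Int)) : List Int :=
  loopB (2 * program.length + 1) (List.replicate 11 0) 0 (program.map toTrip) []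

-- ===== PRECONDITION & SPEC =====
-- Pre_ excludes exactly the inputs on which A raises: a row that is not a triple
-- (IndexError in the sort key or ValueError on unpacking), or a level that is not a
-- valid Python index into the 11-slot answer list (IndexError on answer[level]).
def Pre_solution (program : List (List Int)) : Prop :=
  ∀ r ∈ program, r.length = 3 ∧ PySem.Raise.InRange 11 (PySem.List.pyGetD r 0 0)
instance (program : List (List Int)) : Decidable (Pre_solution program) := by
  unfold Pre_solution; infer_instance

def pvWitness_solution : List (List Int) := [[1, 0, 2], [2, 0, 3], [1, 5, 1]]

def Spec_solution (program : List (List Int)) (out : List Int) : Prop :=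
  out = solution_alt program
instance (program : List (List Int)) (out : List Int) : Decidable (Spec_solution program out) := by
  unfold Spec_solution; infer_instance

-- ===== CLAIM (what is proved, stated in full; the proofs are below) =====
def Claim_equal_solution : Prop :=
  ∀ (program : List (List Int)), Dom_solution program → Pre_solution program →
    Spec_solution program (solution program)

-- ===== LEMMAS AND PROOFS =====

-- the start key used by A's sort
def key1 (r : List Int) : Int := PySem.List.pyGetD r 1 0

-- the comparison `(k1 x, k2 x) < (k1 y, k2 y)` that drives sorted2's insertion sort
def cmpSL (a b : List Int) : Bool :=
  decide (PySem.List.pyGetD a 1 0 < PySem.List.pyGetD b 1 0) ||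
    (!decide (PySem.List.pyGetD b 1 0 < PySem.List.pyGetD a 1 0) &&
      decide (PySem.List.pyGetD a 0 0 < PySem.List.pyGetD b 0 0))

theorem lexLt_irrefl (a : Int × Int × Int) : lexLt a a = false := by
  simp [lexLt]

theorem lexLt_trans {a b c : Int × Int × Int} (h1 : lexLt a b = true)
    (h2 : lexLt b c = true) : lexLt a c = true := by
  simp only [lexLt, Bool.or_eq_true, Bool.and_eq_true, decide_eq_true_eq] at *
  omega

theorem lexLt_asymm {a b : Int × Int × Int} (h : lexLt a b = true) :
    lexLt b a = false := by
  cases hb : lexLt b a with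
  | false => rfl
  | true =>
    exfalso
    have := lexLt_trans h hb
    rw [lexLt_irrefl] at this
    simp at this

theorem lexLe_trans {a b c : Int × Int × Int} (h1 : lexLt b a = false)
    (h2 : lexLt c b = false) : lexLt c a = false := by
  simp only [lexLt, Bool.or_eq_false_iff, Bool.and_eq_false_iff,
    decide_eq_false_iff_not, Bool.or_eq_false_iff] at *
  omega

theorem lexLe_antisymm {a b : Int × Int × Int} (h1 : lexLt b a = false)
    (h2 : lexLt a b = false) : a = b := by
  obtain ⟨a1, a2, a3⟩ := a
  obtain ⟨b1, b2, b3⟩ := b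
  simp only [lexLt, Bool.or_eq_false_iff, Bool.and_eq_false_iff,
    decide_eq_false_iff_not] at *
  simp only [Prod.mk.injEq]
  omega

-- heap invariant: ordered queue (head = minimum)
def SortedH (h : List (Int × Int × Int)) : Prop :=
  h.Pairwise (fun a b => lexLt b a = false)

theorem heapPush_perm (h : List (Int × Int × Int)) (x : Int × Int × Int) :
    (heapPush h x).Perm (x :: h) := by
  induction h with
  | nil => exact List.Perm.refl _
  | cons y t ih =>
    simp only [heapPush]
    split
    · exact List.Perm.refl _
    · exact ((ih).cons y).trans (List.Perm.swap x y t)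

theorem mem_heapPush {z x : Int × Int × Int} {h : List (Int × Int × Int)}
    (hz : z ∈ heapPush h x) : z = x ∨ z ∈ h := by
  have := (heapPush_perm h x).mem_iff.mp hz
  simpa using this

theorem heapPush_sorted {h : List (Int × Int × Int)} (x : Int × Int × Int)
    (hs : SortedH h) : SortedH (heapPush h x) := by
  induction h with
  | nil => simp [heapPush, SortedH]
  | cons y t ih =>
    rcases List.pairwise_cons.mp hs with ⟨hy, ht⟩
    simp only [heapPush]
    split
    · rename_i hlt
      refine List.pairwise_cons.mpr ⟨?_, hs⟩
      intro z hz
      rcases List.mem_cons.mp hz with rfl | hz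
      · exact lexLt_asymm hlt
      · exact lexLe_trans (lexLt_asymm hlt) (hy z hz)
    · rename_i hlt
      have hxy : lexLt x y = false := by simpa using hlt
      refine List.pairwise_cons.mpr ⟨?_, ih ht⟩
      intro z hz
      rcases mem_heapPush hz with rfl | hz
      · exact hxy
      · exact hy z hz

theorem pushAll_sorted (p : List (List Int)) (time : Int) :
    ∀ (k i : Nat) (h : List (Int × Int × Int)), SortedH h →
      SortedH (pushAllA p time k i h).1 := by
  intro k
  induction k with
  | zero => intro i h hs; exact hs
  | succ k ih =>
    intro i h hs
    simp only [pushAllA]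
    split
    · split
      · exact ih _ _ (heapPush_sorted _ hs)
      · exact hs
    · exact hs

-- ---- sortedness of A's sorted2 call in the start key ----

theorem cmpSL_trans {a b c : List Int} (h1 : cmpSL a b = true) (h2 : cmpSL b c = true) :
    cmpSL a c = true := by
  simp only [cmpSL, Bool.or_eq_true, Bool.and_eq_true, Bool.not_eq_true',
    decide_eq_true_eq, decide_eq_false_iff_not] at *
  omega

theorem cmpSL_asymm {a b : List Int} (h : cmpSL a b = true) : cmpSL b a = false := by
  simp only [cmpSL, Bool.or_eq_true, Bool.and_eq_true, Bool.not_eq_true',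
    decide_eq_true_eq, decide_eq_false_iff_not] at h
  simp only [cmpSL, Bool.or_eq_false_iff, Bool.and_eq_false_iff, Bool.not_eq_false',
    decide_eq_false_iff_not, decide_eq_true_eq]
  omega

theorem sorted2_eq_fold (xs : List (List Int)) :
    PySem.List.sorted2 xs (fun x => PySem.List.pyGetD x 1 0)
      (fun x => PySem.List.pyGetD x 0 0) false
    = xs.foldl (fun acc x => PySem.List.insertBy cmpSL x acc) [] := rfl

theorem insertBy_noLater {l : List (List Int)} (x : List Int)
    (h : l.Pairwise (fun a b => cmpSL b a = false)) :
    (PySem.List.insertBy cmpSL x l).Pairwise (fun a b => cmpSL b a = false) := by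
  induction l with
  | nil => simp [PySem.List.insertBy]
  | cons y t ih =>
    rcases List.pairwise_cons.mp h with ⟨hy, ht⟩
    simp only [PySem.List.insertBy]
    split
    · rename_i hxy
      refine List.pairwise_cons.mpr ⟨?_, h⟩
      intro z hz
      rcases List.mem_cons.mp hz with rfl | hz
      · exact cmpSL_asymm hxy
      · cases hzx : cmpSL z x with
        | false => rfl
        | true =>
          have := cmpSL_trans hzx hxy
          rw [hy z hz] at this
          simp at this
    · rename_i hxy
      refine List.pairwise_cons.mpr ⟨?_, ih ht⟩
      intro z hz
      rcases (PySem.List.mem_insertBy _ _ _ _).mp hz with rfl | hz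
      · simpa using hxy
      · exact hy z hz

theorem foldl_noLater : ∀ (xs acc : List (List Int)),
    acc.Pairwise (fun a b => cmpSL b a = false) →
    (xs.foldl (fun acc x => PySem.List.insertBy cmpSL x acc) acc).Pairwise
      (fun a b => cmpSL b a = false) := by
  intro xs
  induction xs with
  | nil => intro acc h; exact h
  | cons x t ih => intro acc h; exact ih _ (insertBy_noLater x h)

theorem sorted2_start_pairwise (xs : List (List Int)) :
    (PySem.List.sorted2 xs (fun x => PySem.List.pyGetD x 1 0)
      (fun x => PySem.List.pyGetD x 0 0) false).Pairwise
      (fun a b => key1 a ≤ key1 b) := by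
  rw [sorted2_eq_fold]
  refine (foldl_noLater xs [] (by simp)).imp ?_
  intro a b hab
  simp only [cmpSL, Bool.or_eq_false_iff, Bool.and_eq_false_iff, Bool.not_eq_false',
    decide_eq_false_iff_not, decide_eq_true_eq] at hab
  simp only [key1]
  omega

-- ---- the push phase: A's index scan computes B's two filters ----

theorem drop_cons_of_lt (p : List (List Int)) {i : Nat} (hi : i < p.length) :
    p.drop i = p[i] :: p.drop (i + 1) := List.drop_eq_getElem_cons hi

theorem pushAll_spec (p : List (List Int)) (time : Int)
    (hp : p.Pairwise (fun a b => key1 a ≤ key1 b)) :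
    ∀ (k i : Nat) (h : List (Int × Int × Int)), p.length ≤ k + i →
      (pushAllA p time k i h).1.Perm
        (h ++ ((p.drop i).map toTrip).filter (fun t => decide (t.2.1 ≤ time)))
      ∧ (p.drop (pushAllA p time k i h).2).map toTrip
        = ((p.drop i).map toTrip).filter (fun t => decide (time < t.2.1)) := by
  intro k
  induction k with
  | zero =>
    intro i h hk
    have hd : p.drop i = [] := List.drop_eq_nil_of_le (by omega)
    simp [pushAllA, hd]
  | succ k ih =>
    intro i h hk
    by_cases hi : i < p.length
    · have hd := drop_cons_of_lt p hi
      by_cases hc : PySem.List.pyGetD p[i] 1 0 ≤ time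
      · have hrec := ih (i + 1) (heapPush h (PySem.List.pyGetD p[i] 0 0,
          PySem.List.pyGetD p[i] 1 0, PySem.List.pyGetD p[i] 2 0)) (by omega)
        have hstep : pushAllA p time (k + 1) i h
            = pushAllA p time k (i + 1) (heapPush h (PySem.List.pyGetD p[i] 0 0,
              PySem.List.pyGetD p[i] 1 0, PySem.List.pyGetD p[i] 2 0)) := by
          simp [pushAllA, hi, hc]
        have hfle : ((p.drop i).map toTrip).filter (fun t => decide (t.2.1 ≤ time))
            = toTrip p[i] :: ((p.drop (i + 1)).map toTrip).filter
                (fun t => decide (t.2.1 ≤ time)) := by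
          rw [hd, List.map_cons, List.filter_cons]
          have hx : decide ((toTrip p[i]).2.1 ≤ time) = true := by
            simp only [toTrip]
            exact decide_eq_true hc
          rw [hx]
          simp
        have hfgt : ((p.drop i).map toTrip).filter (fun t => decide (time < t.2.1))
            = ((p.drop (i + 1)).map toTrip).filter (fun t => decide (time < t.2.1)) := by
          rw [hd, List.map_cons, List.filter_cons]
          have hx : decide (time < (toTrip p[i]).2.1) = false := by
            simp only [toTrip]
            apply decide_eq_false
            omega
          rw [hx]
          simp
        rw [hstep, hfle, hfgt]
        constructor
        · refine hrec.1.trans ?_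
          exact ((heapPush_perm h _).append_right _).trans List.perm_middle.symm
        · exact hrec.2
      · have hstep : pushAllA p time (k + 1) i h = (h, i) := by
          simp [pushAllA, hi, hc]
        rw [hstep]
        have hall : ∀ t ∈ (p.drop i).map toTrip, time < t.2.1 := by
          intro t ht
          rcases List.mem_map.mp ht with ⟨r, hr, rfl⟩
          rw [hd] at hr
          show time < PySem.List.pyGetD r 1 0
          rcases List.mem_cons.mp hr with rfl | hr
          · omega
          · have hpw := hp.sublist (List.drop_sublist i p)
            rw [hd] at hpw
            have h1 : key1 p[i] ≤ key1 r := (List.pairwise_cons.mp hpw).1 r hr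
            simp only [key1] at h1
            omega
        have hflenil : ((p.drop i).map toTrip).filter (fun t => decide (t.2.1 ≤ time))
            = [] := by
          rw [List.filter_eq_nil_iff]
          intro t ht
          have := hall t ht
          simp only [decide_eq_true_eq]
          omega
        have hfgtself : ((p.drop i).map toTrip).filter (fun t => decide (time < t.2.1))
            = (p.drop i).map toTrip := by
          rw [List.filter_eq_self]
          intro t ht
          simpa using hall t ht
        rw [hflenil, hfgtself, List.append_nil]
        exact ⟨List.Perm.refl h, rfl⟩
    · have hstep : pushAllA p time (k + 1) i h = (h, i) := by
        simp [pushAllA, hi]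
      have hd : p.drop i = [] := List.drop_eq_nil_of_le (by omega)
      rw [hstep, hd]
      simp

-- ---- B's min scan and min-start fold ----

theorem minScan_cons (x y : Int × Int × Int) (t : List (Int × Int × Int)) :
    minScan x (y :: t) = minScan (if lexLt y x then y else x) t := rfl

theorem minScan_mem (x : Int × Int × Int) (rest : List (Int × Int × Int)) :
    minScan x rest ∈ x :: rest := by
  induction rest generalizing x with
  | nil => simp [minScan]
  | cons y t ih =>
    rw [minScan_cons]
    rcases List.mem_cons.mp (ih (if lexLt y x then y else x)) with h | h
    · rw [h]; split <;> simp
    · simp [h]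

theorem minScan_min (x : Int × Int × Int) (rest : List (Int × Int × Int)) :
    ∀ y ∈ x :: rest, lexLt y (minScan x rest) = false := by
  induction rest generalizing x with
  | nil =>
    intro y hy
    simp only [List.mem_cons, List.not_mem_nil, or_false] at hy
    subst hy
    simp [minScan, lexLt_irrefl]
  | cons z t ih =>
    intro y hy
    rw [minScan_cons]
    by_cases hzx : lexLt z x = true
    · rw [if_pos hzx]
      rcases List.mem_cons.mp hy with rfl | hy'
      · cases hym : lexLt y (minScan z t) with
        | false => rfl
        | true =>
          exfalso
          have hzm := ih z z List.mem_cons_self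
          rw [lexLt_trans hzx hym] at hzm
          simp at hzm
      · rcases List.mem_cons.mp hy' with rfl | hy''
        · exact ih y y List.mem_cons_self
        · exact ih z y (List.mem_cons_of_mem _ hy'')
    · rw [if_neg hzx]
      have hzx' : lexLt z x = false := by simpa using hzx
      rcases List.mem_cons.mp hy with rfl | hy'
      · exact ih y y List.mem_cons_self
      · rcases List.mem_cons.mp hy' with rfl | hy''
        · exact lexLe_trans (ih x x List.mem_cons_self) hzx'
        · exact ih x y (List.mem_cons_of_mem _ hy'')

theorem sorted_head_min {x : Int × Int × Int} {rest : List (Int × Int × Int)}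
    (hs : SortedH (x :: rest)) : ∀ y ∈ x :: rest, lexLt y x = false := by
  intro y hy
  rcases List.mem_cons.mp hy with rfl | hy
  · exact lexLt_irrefl y
  · exact (List.pairwise_cons.mp hs).1 y hy

theorem foldMin_le (qs : List (Int × Int × Int)) :
    ∀ (a : Int), (qs.foldl (fun m t => min m t.2.1) a ≤ a
      ∧ ∀ t ∈ qs, qs.foldl (fun m t => min m t.2.1) a ≤ t.2.1) := by
  induction qs with
  | nil => intro a; simp
  | cons q t ih =>
    intro a
    have h := ih (min a q.2.1)
    constructor
    · exact le_trans h.1 (min_le_left _ _)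
    · intro s hs
      rcases List.mem_cons.mp hs with rfl | hs
      · exact le_trans h.1 (min_le_right _ _)
      · exact h.2 s hs

theorem foldMin_mem (qs : List (Int × Int × Int)) :
    ∀ (a : Int), qs.foldl (fun m t => min m t.2.1) a = a
      ∨ ∃ t ∈ qs, qs.foldl (fun m t => min m t.2.1) a = t.2.1 := by
  induction qs with
  | nil => intro a; simp
  | cons q t ih =>
    intro a
    rcases ih (min a q.2.1) with h | ⟨s, hs, h⟩
    · rcases min_cases a q.2.1 with ⟨he, _⟩ | ⟨he, _⟩
      · left; rw [List.foldl_cons, h, he]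
      · right; exact ⟨q, List.mem_cons_self, by rw [List.foldl_cons, h, he]⟩
    · right; exact ⟨s, List.mem_cons_of_mem _ hs, h⟩

-- the jump target: the min pending start is the head start of the sorted suffix
theorem foldMin_eq_head (p : List (List Int)) (hp : p.Pairwise (fun a b => key1 a ≤ key1 b))
    {i : Nat} (hi : i < p.length) {q : Int × Int × Int} {qs : List (Int × Int × Int)}
    (hperm : (q :: qs).Perm ((p.drop i).map toTrip)) :
    qs.foldl (fun m t => min m t.2.1) q.2.1 = startOf p i := by
  have hd := drop_cons_of_lt p hi
  have hmem : toTrip p[i] ∈ q :: qs := by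
    refine hperm.symm.subset ?_
    rw [hd, List.map_cons]
    exact List.mem_cons_self ..
  have hstart : (toTrip p[i]).2.1 = startOf p i := by
    simp [toTrip, startOf, List.getD_eq_getElem?_getD, List.getElem?_eq_getElem hi]
  have hle : qs.foldl (fun m t => min m t.2.1) q.2.1 ≤ startOf p i := by
    rcases List.mem_cons.mp hmem with hq | hq
    · rw [← hstart, hq]
      exact (foldMin_le qs q.2.1).1
    · rw [← hstart]
      exact (foldMin_le qs q.2.1).2 _ hq
  have hge : startOf p i ≤ qs.foldl (fun m t => min m t.2.1) q.2.1 := by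
    have hlow : ∀ t ∈ q :: qs, startOf p i ≤ t.2.1 := by
      intro t ht
      rcases List.mem_map.mp (hperm.subset ht) with ⟨r, hr, rfl⟩
      rw [hd] at hr
      rcases List.mem_cons.mp hr with rfl | hr
      · rw [hstart]
      · have hpw := hp.sublist (List.drop_sublist i p)
        rw [hd] at hpw
        have h1 := (List.pairwise_cons.mp hpw).1 r hr
        have h2 : (toTrip r).2.1 = key1 r := rfl
        rw [h2, ← hstart]
        exact h1
    rcases foldMin_mem qs q.2.1 with h | ⟨s, hs, h⟩
    · rw [h]; exact hlow q List.mem_cons_self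
    · rw [h]; exact hlow s (List.mem_cons_of_mem _ hs)
  omega

-- the bisimulation: A's (index, heap) state and B's (pending, ready) state
theorem loop_eq (p : List (List Int)) (hp : p.Pairwise (fun a b => key1 a ≤ key1 b)) :
    ∀ (fuel : Nat) (answer : List Int) (time : Int) (i : Nat)
      (heap pending ready : List (Int × Int × Int)),
      SortedH heap → heap.Perm ready → pending.Perm ((p.drop i).map toTrip) →
      loopA p fuel answer time i heap = loopB fuel answer time pending ready := by
  intro fuel
  induction fuel with
  | zero => intro answer time i heap pending ready _ _ _; rfl
  | succ fuel ih =>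
    intro answer time i heap pending ready hsort hready hpend
    have hplen : pending.length = (p.drop i).length := by
      simpa using hpend.length_eq
    have hiff : i < p.length ↔ pending ≠ [] := by
      rw [ne_eq, ← List.length_eq_zero_iff, hplen, List.length_drop]
      omega
    have hiff2 : heap ≠ [] ↔ ready ≠ [] := by
      constructor
      · intro h hn
        subst hn
        exact h hready.eq_nil
      · intro h hn
        subst hn
        exact h hready.symm.eq_nil
    by_cases hguard : i < p.length ∨ heap ≠ []
    · have hguardB : pending ≠ [] ∨ ready ≠ [] := by
        rcases hguard with h | h
        · exact Or.inl (hiff.mp h)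
        · exact Or.inr (hiff2.mp h)
      have hspec := pushAll_spec p time hp (p.length - i) i heap (by omega)
      have hsorted' := pushAll_sorted p time (p.length - i) i heap hsort
      simp only [loopA, loopB, if_pos hguard, if_pos hguardB]
      rcases hA : pushAllA p time (p.length - i) i heap with ⟨hl, i'⟩
      rw [hA] at hspec hsorted'
      simp only at hspec hsorted'
      -- B's two filters, related to A's state after the push phase
      have hreadyP : (ready ++ pending.filter (fun t => decide (t.2.1 ≤ time))).Perm hl :=
        (hready.symm.append (hpend.filter _)).trans hspec.1.symm
      have hpendP : (pending.filter (fun t => decide (time < t.2.1))).Perm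
          ((p.drop i').map toTrip) := by
        rw [hspec.2]
        exact hpend.filter _
      cases hl with
      | nil =>
        have hr0 : ready ++ pending.filter (fun t => decide (t.2.1 ≤ time)) = [] :=
          hreadyP.eq_nil
        rw [hr0]
        simp only
        by_cases hi' : i' < p.length
        · rw [if_pos hi']
          have hne : pending.filter (fun t => decide (time < t.2.1)) ≠ [] := by
            intro hnil
            rw [hnil] at hpendP
            have h1 : ((p.drop i').map toTrip).length = 0 := by
              rw [← hpendP.length_eq]
              rfl
            simp only [List.length_map, List.length_drop] at h1
            omega
          rcases hq : pending.filter (fun t => decide (time < t.2.1)) with _ | ⟨q, qs⟩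
          · exact absurd hq hne
          · rw [hq] at hpendP
            have hmin := foldMin_eq_head p hp hi' hpendP
            rw [hq]
            show loopA p fuel answer (startOf p i') i' []
              = loopB fuel answer (qs.foldl (fun m t => min m t.2.1) q.2.1) (q :: qs) []
            rw [hmin]
            exact ih answer (startOf p i') i' [] (q :: qs) [] List.Pairwise.nil
              (List.Perm.refl _) hpendP
        · rw [if_neg hi']
          have hd : p.drop i' = [] := List.drop_eq_nil_of_le (by omega)
          rw [hd] at hpendP
          have : pending.filter (fun t => decide (time < t.2.1)) = [] := by
            simpa using hpendP.eq_nil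
          rw [this]
      | cons x restA =>
        rcases hrB : ready ++ pending.filter (fun t => decide (t.2.1 ≤ time))
          with _ | ⟨y, restB⟩
        · rw [hrB] at hreadyP
          exact absurd hreadyP.symm.eq_nil (by simp)
        · rw [hrB] at hreadyP
          simp only
          -- the selected program: B's scan minimum is A's heap head
          have hbmem : minScan y restB ∈ x :: restA := hreadyP.subset (minScan_mem y restB)
          have hxmem : x ∈ y :: restB := hreadyP.symm.subset List.mem_cons_self
          have hbx : minScan y restB = x :=
            lexLe_antisymm (minScan_min y restB x hxmem) (sorted_head_min hsorted' _ hbmem)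
          have hremove : (PySem.List.remove? (y :: restB) (minScan y restB)).getD (y :: restB)
              = (y :: restB).erase (minScan y restB) := by
            rw [PySem.List.remove?_eq_some_erase _ _ (minScan_mem y restB)]; rfl
          have hperm' : restA.Perm ((y :: restB).erase x) := by
            have := hreadyP.symm.erase x
            simpa using this
          rw [hremove, hbx]
          exact ih _ _ i' restA _ _ ((List.pairwise_cons.mp hsorted').2) hperm' hpendP
    · have hheap : heap = [] := by
        by_contra hne
        exact hguard (Or.inr hne)
      have hguardB : ¬ (pending ≠ [] ∨ ready ≠ []) := by
        intro hc
        rcases hc with h | h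
        · exact hguard (Or.inl (hiff.mpr h))
        · exact hguard (Or.inr (hiff2.mpr h))
      simp only [loopA, loopB, if_neg hguard, if_neg hguardB]

-- ===== VERDICT (by name: the statement is the Claim_ definition above) =====
theorem solution_spec : Claim_equal_solution := by
  intro program _ _
  unfold Spec_solution solution solution_alt
  have hp := sorted2_start_pairwise program
  have hperm : (PySem.List.sorted2 program (fun x => PySem.List.pyGetD x 1 0)
      (fun x => PySem.List.pyGetD x 0 0) false).Perm program := PySem.List.sorted2_perm ..
  have hlen : (PySem.List.sorted2 program (fun x => PySem.List.pyGetD x 1 0)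
      (fun x => PySem.List.pyGetD x 0 0) false).length = program.length := hperm.length_eq
  rw [← hlen]
  exact loop_eq _ hp _ _ 0 0 [] _ [] List.Pairwise.nil (List.Perm.refl _)
    (by simpa using (hperm.map toTrip).symm)
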